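-- pv_equiv track=rewrite | github.com/MalvinaNikandrou/visual-assistant-eval | tasks/multilingual_image_question_answering/src/filter.py | get_max_repeated_n_grams
-- ===== SOURCE A (Python) =====
-- def get_max_repeated_n_grams(n_grams: list[str]) -> int:
--     max_repetitions = 0
--     cur_repetitions = 1
--     repeated_ngram = n_grams[0]
--     for n_gram in n_grams[1:]:
--         if n_gram == repeated_ngram:
--             cur_repetitions += 1
--         else:
--             repeated_ngram = n_gram
--             max_repetitions = max(max_repetitions, cur_repetitions)
--             cur_repetitions = 1
--     return max(max_repetitions, cur_repetitions)
-- ===== SOURCE B (Python) =====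
-- def _runs(xs):
--     runs = []
--     i = 0
--     n = len(xs)
--     while i < n:
--         j = i + 1
--         while j < n and xs[j] == xs[i]:
--             j += 1
--         runs.append(j - i)
--         i = j
--     return runs
--
--
-- def get_max_repeated_n_grams(n_grams: list[str]) -> int:
--     return max(_runs(n_grams))
-- ===== Notes on version B (the rewrite author's own statement) =====
-- stated objective: alternative
-- what changed: B first decomposes the list into consecutive-run lengths (recursive prefix-consuming helper) and then takes a single max over them, instead of A's inline running-counter/running-max scan.
import Mathlib
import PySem

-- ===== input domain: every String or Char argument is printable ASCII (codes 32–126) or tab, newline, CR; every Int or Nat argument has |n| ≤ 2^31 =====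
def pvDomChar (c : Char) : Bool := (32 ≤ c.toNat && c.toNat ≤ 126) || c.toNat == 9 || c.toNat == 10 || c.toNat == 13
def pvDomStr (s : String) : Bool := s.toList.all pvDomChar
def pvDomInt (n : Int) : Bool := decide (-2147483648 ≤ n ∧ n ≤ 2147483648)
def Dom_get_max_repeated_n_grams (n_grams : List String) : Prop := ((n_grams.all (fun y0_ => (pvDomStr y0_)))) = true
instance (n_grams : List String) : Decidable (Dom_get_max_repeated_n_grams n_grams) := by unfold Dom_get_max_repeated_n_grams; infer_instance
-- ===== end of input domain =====

-- B decomposes the list into consecutive-run lengths and takes one max over them,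
-- instead of A's inline running-counter scan (objective: alternative decomposition).


-- ===== PORT A =====
-- literal transliteration: state (max_repetitions, cur_repetitions, repeated_ngram),
-- loop over n_grams[1:]; the [] case is unreachable under Pre_ (Python raises IndexError on n_grams[0]).
def get_max_repeated_n_grams (n_grams : List String) : Int :=
  match n_grams with
  | [] => 0
  | first :: rest =>
    let s := rest.foldl
      (fun (st : Int × Int × String) n_gram =>
        if n_gram == st.2.2 then (st.1, st.2.1 + 1, st.2.2)
        else (max st.1 st.2.1, 1, n_gram))
      (0, 1, first)
    max s.1 s.2.1

-- ===== PORT B =====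
-- the inner while loop 'j = i + 1; while j < n and xs[j] == xs[i]: j += 1' counts the
-- elements after position i equal to xs[i] (exact: indices stay in range); here the
-- suffix xs[i:] is the list and its head is xs[i].
def pvCountEq (head : String) : List String → Nat
  | [] => 0
  | x :: t => if x == head then pvCountEq head t + 1 else 0

-- the outer while loop of _runs: each iteration appends the run length j - i = count + 1
-- and continues from the suffix at j (= t.drop (pvCountEq head t)).
def pvRuns : List String → List Int
  | [] => []
  | head :: t => ((pvCountEq head t : Int) + 1) :: pvRuns (t.drop (pvCountEq head t))
termination_by xs => xs.length
decreasing_by simp [List.length_drop]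

-- max(runs); runs = [] (empty input) is unreachable under Pre_ (Python raises ValueError).
def get_max_repeated_n_grams_alt (n_grams : List String) : Int :=
  match PySem.List.max? (pvRuns n_grams) (fun y => y) with
  | some m => m
  | none => 0

-- ===== PRECONDITION & SPEC =====
-- Pre_ excludes only the empty list, on which A raises IndexError (and B raises ValueError).
def Pre_get_max_repeated_n_grams (n_grams : List String) : Prop := n_grams ≠ []
instance (n_grams : List String) : Decidable (Pre_get_max_repeated_n_grams n_grams) := by unfold Pre_get_max_repeated_n_grams; infer_instance
def pvWitness_get_max_repeated_n_grams : List String := ["a", "a", "b"]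

def Spec_get_max_repeated_n_grams (n_grams : List String) (out : Int) : Prop := out = get_max_repeated_n_grams_alt n_grams
instance (n_grams : List String) (out : Int) : Decidable (Spec_get_max_repeated_n_grams n_grams out) := by unfold Spec_get_max_repeated_n_grams; infer_instance

-- ===== CLAIM (what is proved, stated in full; the proofs are below) =====
def Claim_equal_get_max_repeated_n_grams : Prop := ∀ (n_grams : List String), Dom_get_max_repeated_n_grams n_grams → Pre_get_max_repeated_n_grams n_grams → Spec_get_max_repeated_n_grams n_grams (get_max_repeated_n_grams n_grams)

-- ===== LEMMAS AND PROOFS =====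

theorem pvRuns_nil : pvRuns [] = [] := by rw [pvRuns.eq_def]

theorem pvRuns_eq (h : String) (t : List String) :
    pvRuns (h :: t) = ((pvCountEq h t : Int) + 1) :: pvRuns (t.drop (pvCountEq h t)) := by
  rw [pvRuns.eq_def]

-- 'runs with a pending run of c copies of rep, followed by t'
def pvRuns' (t : List String) (rep : String) (c : Int) : List Int :=
  (c + (pvCountEq rep t : Int)) :: pvRuns (t.drop (pvCountEq rep t))

-- the body of A's final expression, as a function of the remaining list and state
def pvG (t : List String) (rep : String) (c m : Int) : Int :=
  let s := t.foldl
    (fun (st : Int × Int × String) n_gram =>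
      if n_gram == st.2.2 then (st.1, st.2.1 + 1, st.2.2)
      else (max st.1 st.2.1, 1, n_gram))
    (m, c, rep)
  max s.1 s.2.1

theorem pvG_eq_foldl_runs' (t : List String) : ∀ (rep : String) (c m : Int),
    pvG t rep c m = (pvRuns' t rep c).foldl max m := by
  induction t with
  | nil =>
    intro rep c m
    simp [pvG, pvRuns', pvCountEq, pvRuns_nil]
  | cons x t ih =>
    intro rep c m
    by_cases h : x = rep
    · subst h
      have hstep : pvG (x :: t) x c m = pvG t x (c + 1) m := by
        simp [pvG, List.foldl_cons]
      rw [hstep, ih x (c + 1) m]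
      simp [pvRuns', pvCountEq]
      congr 2
      omega
    · have hstep : pvG (x :: t) rep c m = pvG t x 1 (max m c) := by
        simp [pvG, List.foldl_cons, h]
      have hc : pvCountEq rep (x :: t) = 0 := by simp [pvCountEq, h]
      rw [hstep, ih x 1 (max m c)]
      unfold pvRuns'
      rw [hc]
      simp only [List.drop_zero, pvRuns_eq, List.foldl_cons]
      congr 1
      omega

theorem pvRuns_cons (h : String) (t : List String) :
    pvRuns (h :: t) = pvRuns' t h 1 := by
  rw [pvRuns_eq]
  unfold pvRuns'
  congr 1
  omega

-- foldl max 0 (a :: l) = foldl max a l when 1 ≤ a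
theorem foldl_max_head (l : List Int) (a : Int) (ha : 1 ≤ a) :
    (a :: l).foldl max 0 = l.foldl max a := by
  have : max 0 a = a := max_eq_right (le_trans (by norm_num) ha)
  simp [List.foldl_cons, this]

-- ===== VERDICT (by name: the statement is the Claim_ definition above) =====
theorem get_max_repeated_n_grams_spec : Claim_equal_get_max_repeated_n_grams := by
  intro n_grams _ hpre
  unfold Spec_get_max_repeated_n_grams
  match n_grams with
  | [] => exact absurd rfl hpre
  | first :: rest =>
    have hA : get_max_repeated_n_grams (first :: rest) = pvG rest first 1 0 := rfl
    rw [hA, pvG_eq_foldl_runs' rest first 1 0]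
    unfold get_max_repeated_n_grams_alt
    rw [pvRuns_cons]
    unfold pvRuns'
    rw [PySem.List.max?_id_cons]
    have h1 : (1 : Int) ≤ 1 + (pvCountEq first rest : Int) := by omega
    rw [foldl_max_head _ _ h1]
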